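-- pv_equiv track=rewrite | github.com/artemzameshaev/Python1 | 8/mod8.py | SumStolb
-- ===== SOURCE A (Python) =====
-- def SumStolb(n,matr,sum_tot,sum_rows):
--     sum_cols=[]
--     for i in range(n):
--         s=0
--         for j in range(n):
--             s+=matr[j][i]
--         sum_cols.append(s)
--
--     # результат
--     res=[[0 for _ in range(n)] for _ in range(n)]
--     for i in range(n):
--         for j in range(n):
--             res[i][j]=sum_tot-sum_rows[i]-sum_cols[j]+matr[i][j]
--     return res
-- ===== SOURCE B (Python) =====
-- def SumStolb(n, matr, sum_tot, sum_rows):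
--     # single nested comprehension: column sums computed on demand, no table phase
--     return [[sum_tot - sum_rows[i] - sum(matr[k][j] for k in range(n)) + matr[i][j]
--              for j in range(n)]
--             for i in range(n)]
-- ===== Notes on version B (the rewrite author's own statement) =====
-- stated objective: idiomatic
-- what changed: Replaced A's two-phase shape (build a column-sum table, then fill a preallocated zero matrix in place) by a single nested comprehension that recomputes each column sum on demand, never building sum_cols or the zero matrix.
import Mathlib
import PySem

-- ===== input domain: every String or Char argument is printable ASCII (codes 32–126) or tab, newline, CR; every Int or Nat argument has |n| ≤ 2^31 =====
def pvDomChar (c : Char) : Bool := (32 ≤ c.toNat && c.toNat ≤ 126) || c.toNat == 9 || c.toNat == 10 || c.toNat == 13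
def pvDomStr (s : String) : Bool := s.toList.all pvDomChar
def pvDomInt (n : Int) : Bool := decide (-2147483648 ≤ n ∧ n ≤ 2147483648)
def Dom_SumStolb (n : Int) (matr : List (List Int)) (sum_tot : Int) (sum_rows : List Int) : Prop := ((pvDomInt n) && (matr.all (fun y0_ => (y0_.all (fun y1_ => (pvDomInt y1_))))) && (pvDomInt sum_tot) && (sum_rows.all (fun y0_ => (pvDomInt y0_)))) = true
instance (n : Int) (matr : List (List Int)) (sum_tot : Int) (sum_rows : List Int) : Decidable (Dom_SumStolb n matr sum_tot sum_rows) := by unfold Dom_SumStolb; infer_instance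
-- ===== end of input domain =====

-- B replaces A's two-phase table-then-fill shape by a single nested comprehension recomputing column sums on demand (idiomatic; return value only).


-- ===== PORT A =====
def SumStolb (n : Int) (matr : List (List Int)) (sum_tot : Int) (sum_rows : List Int) : List (List Int) :=
  -- first loop: build sum_cols by appending one column sum per i
  let sum_cols : List Int :=
    (PySem.List.pyRange 0 n 1).foldl (fun acc i =>
      acc ++ [(PySem.List.pyRange 0 n 1).foldl (fun s j =>
        s + PySem.List.pyGetD (PySem.List.pyGetD matr j []) i 0) 0]) []
  -- second phase: fill res[i][j] = sum_tot - sum_rows[i] - sum_cols[j] + matr[i][j]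
  (PySem.List.pyRange 0 n 1).map (fun i =>
    (PySem.List.pyRange 0 n 1).map (fun j =>
      sum_tot - PySem.List.pyGetD sum_rows i 0 - PySem.List.pyGetD sum_cols j 0
        + PySem.List.pyGetD (PySem.List.pyGetD matr i []) j 0))

-- ===== PORT B =====
def SumStolb_alt (n : Int) (matr : List (List Int)) (sum_tot : Int) (sum_rows : List Int) : List (List Int) :=
  (PySem.List.pyRange 0 n 1).map (fun i =>
    (PySem.List.pyRange 0 n 1).map (fun j =>
      sum_tot - PySem.List.pyGetD sum_rows i 0
        - (PySem.List.pyRange 0 n 1).foldl (fun s k =>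
            s + PySem.List.pyGetD (PySem.List.pyGetD matr k []) j 0) 0
        + PySem.List.pyGetD (PySem.List.pyGetD matr i []) j 0))

-- ===== PRECONDITION & SPEC =====
-- Pre_ excludes exactly the inputs where A raises IndexError: some index in range(n) falls
-- outside matr, a needed row of matr, or sum_rows.
def Pre_SumStolb (n : Int) (matr : List (List Int)) (sum_tot : Int) (sum_rows : List Int) : Prop :=
  n ≤ (matr.length : Int) ∧ n ≤ (sum_rows.length : Int) ∧
    ∀ row ∈ matr.take n.toNat, n ≤ (row.length : Int)
instance (n : Int) (matr : List (List Int)) (sum_tot : Int) (sum_rows : List Int) : Decidable (Pre_SumStolb n matr sum_tot sum_rows) := by unfold Pre_SumStolb; infer_instance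
def pvWitness_SumStolb : Int × List (List Int) × Int × List Int := (2, [[1, 2], [3, 4]], 10, [3, 7])
def Spec_SumStolb (n : Int) (matr : List (List Int)) (sum_tot : Int) (sum_rows : List Int) (out : List (List Int)) : Prop := out = SumStolb_alt n matr sum_tot sum_rows
instance (n : Int) (matr : List (List Int)) (sum_tot : Int) (sum_rows : List Int) (out : List (List Int)) : Decidable (Spec_SumStolb n matr sum_tot sum_rows out) := by unfold Spec_SumStolb; infer_instance

-- ===== CLAIM (what is proved, stated in full; the proofs are below) =====
def Claim_equal_SumStolb : Prop := ∀ (n : Int) (matr : List (List Int)) (sum_tot : Int) (sum_rows : List Int), Dom_SumStolb n matr sum_tot sum_rows → Pre_SumStolb n matr sum_tot sum_rows → Spec_SumStolb n matr sum_tot sum_rows (SumStolb n matr sum_tot sum_rows)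

-- ===== LEMMAS AND PROOFS =====
-- ===== VERDICT (by name: the statement is the Claim_ definition above) =====
theorem SumStolb_spec : Claim_equal_SumStolb := by
  intro n matr sum_tot sum_rows _ _
  unfold Spec_SumStolb SumStolb SumStolb_alt
  rw [PySem.List.foldl_append_singleton_eq_map]
  refine List.map_congr_left ?_
  intro i _
  refine List.map_congr_left ?_
  intro j hj
  obtain ⟨hj0, hjn⟩ := (PySem.List.mem_pyRange_one).1 hj
  rw [List.nil_append, PySem.List.pyGetD_map_pyRange_of_nonneg _ _ _ _ hj0 hjn]
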